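-- pv_equiv track=rewrite | github.com/sejin-P/leethub | 1950-maximum-of-minimum-values-in-all-subarrays/1950-maximum-of-minimum-values-in-all-subarrays.py | findMaximums
-- ===== SOURCE A (Python) =====
-- from typing import List
--
-- def findMaximums(nums: List[int]) -> List[int]:
--     n = len(nums)
--     res = [0] * n
--     stack = []
--     ris = [n] * n
--     lis = [-1] * n
--     for i in range(n):
--         while stack and nums[stack[-1]] > nums[i]:
--             ri = stack.pop()
--             ris[ri] = i
--         if stack:
--             lis[i] = stack[-1]
--         stack.append(i)
--     for i in range(n):
--         maxLen = ris[i] - lis[i] - 1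
--         res[maxLen-1] = max(res[maxLen-1], nums[i])
--     for i in range(n-2, -1, -1):
--         res[i] = max(res[i], res[i+1])
--
--     return res
-- ===== SOURCE B (Python) =====
-- from typing import List
--
-- def findMaximums(nums: List[int]) -> List[int]:
--     n = len(nums)
--     res = [0] * n
--     for i in range(n):
--         l = i - 1
--         while l >= 0 and nums[l] > nums[i]:
--             l -= 1
--         r = i + 1
--         while r < n and nums[r] >= nums[i]:
--             r += 1
--         maxLen = r - l - 1
--         res[maxLen - 1] = max(res[maxLen - 1], nums[i])
--     for i in range(n - 2, -1, -1):
--         res[i] = max(res[i], res[i + 1])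
--     return res
-- ===== Notes on version B (the rewrite author's own statement) =====
-- stated objective: simpler
-- what changed: Replaces the fused monotonic-stack pass by direct per-index nearest-boundary scans: for each i, walk left to the nearest j with nums[j] <= nums[i] and right to the nearest j with nums[j] < nums[i], then the same bucket fill and suffix-max sweep.
import Mathlib
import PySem

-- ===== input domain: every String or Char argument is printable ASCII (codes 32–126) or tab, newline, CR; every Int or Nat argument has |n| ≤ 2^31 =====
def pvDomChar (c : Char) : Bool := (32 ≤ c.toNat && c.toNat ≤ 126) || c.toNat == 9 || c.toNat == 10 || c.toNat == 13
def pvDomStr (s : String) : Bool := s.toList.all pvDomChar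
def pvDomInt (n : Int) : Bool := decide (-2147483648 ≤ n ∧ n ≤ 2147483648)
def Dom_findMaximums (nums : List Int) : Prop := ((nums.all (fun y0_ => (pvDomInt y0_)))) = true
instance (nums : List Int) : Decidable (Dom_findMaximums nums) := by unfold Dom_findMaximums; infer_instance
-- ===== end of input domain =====

-- B replaces A's fused monotonic-stack pass by direct per-index nearest-boundary scans (simpler; O(n^2) vs A's O(n), not faster).

-- ===== PORT A =====
-- the inner `while stack and nums[stack[-1]] > nums[i]` loop (stack head = Python stack[-1])
def popA (nums : List Int) (i : Nat) : List Nat → List Int → List Nat × List Int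
  | [], ris => ([], ris)
  | j :: rest, ris =>
    if nums.getD i 0 < nums.getD j 0 then popA nums i rest (ris.set j (i : Int))
    else (j :: rest, ris)

-- `if stack: lis[i] = stack[-1]`
def topA (lis : List Int) (i : Nat) : List Nat → List Int
  | [] => lis
  | j :: _ => lis.set i (j : Int)

-- one iteration of A's first `for i in range(n)` loop over the state (stack, ris, lis)
def stepA (nums : List Int) (s : List Nat × List Int × List Int) (i : Nat) :
    List Nat × List Int × List Int :=
  let p := popA nums i s.1 s.2.1
  (i :: p.1, p.2, topA s.2.2 i p.1)

def findMaximums (nums : List Int) : List Int :=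
  let n := nums.length
  let st := (List.range n).foldl (stepA nums)
    ([], List.replicate n (n : Int), List.replicate n (-1 : Int))
  let res := (List.range n).foldl (fun res i =>
    let maxLen := st.2.1.getD i 0 - st.2.2.getD i 0 - 1
    res.set (maxLen - 1).toNat (max (res.getD (maxLen - 1).toNat 0) (nums.getD i 0)))
    (List.replicate n (0 : Int))
  (List.range (n - 1)).reverse.foldl
    (fun res i => res.set i (max (res.getD i 0) (res.getD (i + 1) 0))) res

-- ===== PORT B =====
-- `l = i - 1; while l >= 0 and nums[l] > nums[i]: l -= 1` (argument = l + 1, result = final l)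
def scanL (nums : List Int) (v : Int) : Nat → Int
  | 0 => -1
  | l + 1 => if v < nums.getD l 0 then scanL nums v l else (l : Int)

-- `r = i + 1; while r < n and nums[r] >= nums[i]: r += 1` (first argument = n - r fuel)
def scanR (nums : List Int) (v : Int) : Nat → Nat → Nat
  | 0, r => r
  | f + 1, r => if v ≤ nums.getD r 0 then scanR nums v f (r + 1) else r

def findMaximums_alt (nums : List Int) : List Int :=
  let n := nums.length
  let res := (List.range n).foldl (fun res i =>
    let v := nums.getD i 0
    let maxLen := ((scanR nums v (n - (i + 1)) (i + 1) : Nat) : Int) - scanL nums v i - 1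
    res.set (maxLen - 1).toNat (max (res.getD (maxLen - 1).toNat 0) v))
    (List.replicate n (0 : Int))
  (List.range (n - 1)).reverse.foldl
    (fun res i => res.set i (max (res.getD i 0) (res.getD (i + 1) 0))) res

-- ===== PRECONDITION & SPEC =====
def Spec_findMaximums (nums : List Int) (out : List Int) : Prop := out = findMaximums_alt nums
instance (nums : List Int) (out : List Int) : Decidable (Spec_findMaximums nums out) := by unfold Spec_findMaximums; infer_instance

-- ===== CLAIM (what is proved, stated in full; the proofs are below) =====
def Claim_equal_findMaximums : Prop := ∀ (nums : List Int), Dom_findMaximums nums → Spec_findMaximums nums (findMaximums nums)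

-- ===== LEMMAS AND PROOFS =====

theorem getD_set' (l : List Int) (i j : Nat) (v d : Int) :
    (l.set i v).getD j d = if j = i ∧ i < l.length then v else l.getD j d := by
  simp only [List.getD, List.getElem?_set]
  split_ifs with h1 h2 h3 <;> simp_all

theorem scanL_none (nums : List Int) (v : Int) (i : Nat)
    (h : ∀ m, m < i → v < nums.getD m 0) : scanL nums v i = -1 := by
  induction i with
  | zero => rfl
  | succ l ih =>
    rw [scanL, if_pos (h l (by omega))]
    exact ih (fun m hm => h m (by omega))

theorem scanL_stop (nums : List Int) (v : Int) (i m0 : Nat)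
    (h0 : m0 < i) (h1 : nums.getD m0 0 ≤ v)
    (h2 : ∀ m, m0 < m → m < i → v < nums.getD m 0) : scanL nums v i = (m0 : Int) := by
  induction i with
  | zero => omega
  | succ l ih =>
    by_cases hml : m0 = l
    · subst hml; rw [scanL, if_neg (by omega)]
    · rw [scanL, if_pos (h2 l (by omega) (by omega))]
      exact ih (by omega) (fun m hm hml' => h2 m hm (by omega))

theorem scanR_all (nums : List Int) (v : Int) (f r : Nat)
    (h : ∀ m, r ≤ m → m < r + f → v ≤ nums.getD m 0) : scanR nums v f r = r + f := by
  induction f generalizing r with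
  | zero => rfl
  | succ f ih =>
    rw [scanR, if_pos (h r (by omega) (by omega))]
    rw [ih (r+1) (fun m hm hm2 => h m (by omega) (by omega))]; omega

theorem scanR_stop (nums : List Int) (v : Int) (f r m0 : Nat)
    (h0 : r ≤ m0) (hf : m0 < r + f) (h1 : nums.getD m0 0 < v)
    (h2 : ∀ m, r ≤ m → m < m0 → v ≤ nums.getD m 0) : scanR nums v f r = m0 := by
  induction f generalizing r with
  | zero => omega
  | succ f ih =>
    by_cases hrm : r = m0
    · subst hrm; rw [scanR, if_neg (by omega)]
    · rw [scanR, if_pos (h2 r (by omega) (by omega))]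
      exact ih (r+1) (by omega) (by omega) (fun m hm hm2 => h2 m (by omega) hm2)

theorem exists_greatest_lt (p : Nat → Prop) [DecidablePred p] (i : Nat)
    (h : ∃ m, m < i ∧ p m) : ∃ m0, m0 < i ∧ p m0 ∧ ∀ m, m0 < m → m < i → ¬ p m := by
  induction i with
  | zero => omega
  | succ l ih =>
    by_cases hl : p l
    · exact ⟨l, by omega, hl, fun m hm hm2 _ => by omega⟩
    · obtain ⟨m, hm, hpm⟩ := h
      obtain ⟨m0, h1, h2, h3⟩ := ih ⟨m, by
        rcases Nat.lt_succ_iff_lt_or_eq.mp hm with h | h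
        · exact h
        · subst h; exact absurd hpm hl, hpm⟩
      refine ⟨m0, by omega, h2, fun m' hm' hm'2 => ?_⟩
      rcases Nat.lt_succ_iff_lt_or_eq.mp hm'2 with h | h
      · exact h3 m' hm' h
      · subst h; exact hl

theorem popA_spec (nums : List Int) (i : Nat) (stack : List Nat) (ris : List Int)
    (hlt : ∀ j ∈ stack, j < ris.length) :
    (popA nums i stack ris).1 = stack.dropWhile (fun j => decide (nums.getD i 0 < nums.getD j 0)) ∧
    (popA nums i stack ris).2.length = ris.length ∧
    ∀ j, (popA nums i stack ris).2.getD j 0 =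
      if j ∈ stack.takeWhile (fun j => decide (nums.getD i 0 < nums.getD j 0)) then (i : Int)
      else ris.getD j 0 := by
  induction stack generalizing ris with
  | nil => simp [popA]
  | cons a rest ih =>
    by_cases hc : nums.getD i 0 < nums.getD a 0
    · have hlt' : ∀ j ∈ rest, j < (ris.set a (i : Int)).length := by
        simpa using fun j hj => hlt j (List.mem_cons_of_mem a hj)
      obtain ⟨h1, h2, h3⟩ := ih (ris.set a (i : Int)) hlt'
      rw [popA, if_pos hc]
      refine ⟨by rw [List.dropWhile_cons, if_pos (by simpa using hc)]; exact h1, by simpa using h2, fun j => ?_⟩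
      rw [h3 j]
      have htw : (a :: rest).takeWhile (fun j => decide (nums.getD i 0 < nums.getD j 0))
          = a :: rest.takeWhile (fun j => decide (nums.getD i 0 < nums.getD j 0)) := by
        rw [List.takeWhile_cons, if_pos (decide_eq_true hc)]
      rw [htw]
      simp only [List.mem_cons]
      by_cases hj : j ∈ rest.takeWhile (fun j => decide (nums.getD i 0 < nums.getD j 0))
      · rw [if_pos hj, if_pos (Or.inr hj)]
      · have ha : a < ris.length := hlt a (List.mem_cons_self ..)
        rw [if_neg hj, getD_set']
        by_cases hja : j = a
        · subst hja
          rw [if_pos ⟨rfl, ha⟩, if_pos (Or.inl rfl)]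
        · rw [if_neg (by tauto), if_neg (by tauto)]
    · rw [popA, if_neg hc]
      refine ⟨by rw [List.dropWhile_cons, if_neg (by simpa using hc)], rfl, fun j => ?_⟩
      have htw : (a :: rest).takeWhile (fun j => decide (nums.getD i 0 < nums.getD j 0))
          = [] := by
        rw [List.takeWhile_cons, if_neg (by simp only [decide_eq_true_iff]; exact hc)]
      rw [htw]
      simp
theorem head_dropWhile_false {α : Type} (p : α → Bool) (l : List α) (h0 : α) (t : List α)
    (h : l.dropWhile p = h0 :: t) : p h0 = false := by
  induction l with
  | nil => simp [List.dropWhile] at h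
  | cons a l ih =>
    rw [List.dropWhile_cons] at h
    by_cases hp : p a = true
    · exact ih (by rwa [if_pos hp] at h)
    · rw [if_neg hp] at h
      cases h
      exact Bool.eq_false_iff.mpr hp

def InvA (nums : List Int) (k : Nat) (s : List Nat × List Int × List Int) : Prop :=
  s.1.Pairwise (· > ·) ∧
  s.2.1.length = nums.length ∧
  s.2.2.length = nums.length ∧
  (∀ j, j ∈ s.1 ↔ (j < k ∧ ∀ m, j < m → m < k → nums.getD j 0 ≤ nums.getD m 0)) ∧
  (∀ j, j < nums.length → (j ∈ s.1 ∨ k ≤ j) → s.2.1.getD j 0 = (nums.length : Int)) ∧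
  (∀ j, j < k → j ∉ s.1 → ∃ m, j < m ∧ m < k ∧ nums.getD m 0 < nums.getD j 0 ∧
      (∀ m', j < m' → m' < m → nums.getD j 0 ≤ nums.getD m' 0) ∧ s.2.1.getD j 0 = (m : Int)) ∧
  (∀ i, i < k → s.2.2.getD i 0 = scanL nums (nums.getD i 0) i) ∧
  (∀ i, k ≤ i → i < nums.length → s.2.2.getD i 0 = -1)

theorem invA_init (nums : List Int) :
    InvA nums 0 ([], List.replicate nums.length ((nums.length : Nat) : Int),
      List.replicate nums.length (-1 : Int)) := by
  refine ⟨by simp, by simp, by simp, by simp, ?_, by simp, by simp, ?_⟩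
  · intro j hj _
    simp [List.getD, hj]
  · intro i _ hi
    simp [List.getD, hi]
theorem invA_step (nums : List Int) (k : Nat) (hk : k < nums.length)
    (s : List Nat × List Int × List Int) (h : InvA nums k s) :
    InvA nums (k + 1) (stepA nums s k) := by
  obtain ⟨st, ris, lis⟩ := s
  obtain ⟨hpw, hrl, hll, hmem, hrisn, hrism, hlis, hlis0⟩ := h
  simp only at hpw hrl hll hmem hrisn hrism hlis hlis0
  have hltk : ∀ j ∈ st, j < k := fun j hj => ((hmem j).mp hj).1
  have hlt : ∀ j ∈ st, j < ris.length := fun j hj => by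
    rw [hrl]; exact lt_trans (hltk j hj) hk
  obtain ⟨hpop1, hpop2, hpop3⟩ := popA_spec nums k st ris hlt
  have hknotin : k ∉ st := fun hx => absurd (hltk k hx) (lt_irrefl k)
  have hmono : ∀ a b, a ∈ st → b ∈ st → b < a → nums.getD b 0 ≤ nums.getD a 0 := by
    intro a b ha hb hba
    exact ((hmem b).mp hb).2 a hba (hltk a ha)
  -- membership in the dropped / kept parts
  have hdw : ∀ j, j ∈ st.dropWhile (fun j => decide (nums.getD k 0 < nums.getD j 0)) ↔
      (j ∈ st ∧ nums.getD j 0 ≤ nums.getD k 0) := by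
    intro j
    constructor
    · intro hj
      have hjs : j ∈ st := (List.dropWhile_sublist _).subset hj
      refine ⟨hjs, ?_⟩
      cases hdd : st.dropWhile (fun j => decide (nums.getD k 0 < nums.getD j 0)) with
      | nil => rw [hdd] at hj; simp at hj
      | cons h0 t =>
        have hh0 : nums.getD h0 0 ≤ nums.getD k 0 := by
          have := head_dropWhile_false _ _ _ _ hdd
          simp only [decide_eq_false_iff_not, not_lt] at this
          exact this
        have hpw' : (h0 :: t).Pairwise (fun a b => a > b) := by
          rw [← hdd]; exact hpw.sublist (List.dropWhile_sublist _)
        have hh0s : h0 ∈ st := (List.dropWhile_sublist _).subset (hdd ▸ List.mem_cons_self ..)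
        rw [hdd] at hj
        rcases List.mem_cons.mp hj with rfl | hjt
        · exact hh0
        · have hgt : h0 > j := (List.pairwise_cons.mp hpw').1 j hjt
          exact le_trans (hmono h0 j hh0s hjs hgt) hh0
    · rintro ⟨hjs, hjv⟩
      have hnp : j ∉ st.takeWhile (fun j => decide (nums.getD k 0 < nums.getD j 0)) := by
        intro hj
        have := List.mem_takeWhile_imp hj
        simp only [decide_eq_true_iff] at this
        exact absurd this (not_lt.mpr hjv)
      have hsplit : j ∈ st.takeWhile (fun j => decide (nums.getD k 0 < nums.getD j 0)) ++
          st.dropWhile (fun j => decide (nums.getD k 0 < nums.getD j 0)) := by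
        rw [List.takeWhile_append_dropWhile]; exact hjs
      rcases List.mem_append.mp hsplit with hx | hx
      · exact absurd hx hnp
      · exact hx
  have htw : ∀ j, j ∈ st.takeWhile (fun j => decide (nums.getD k 0 < nums.getD j 0)) ↔
      (j ∈ st ∧ nums.getD k 0 < nums.getD j 0) := by
    intro j
    constructor
    · intro hj
      refine ⟨(List.takeWhile_sublist _).subset hj, ?_⟩
      have := List.mem_takeWhile_imp hj
      simpa using this
    · rintro ⟨hjs, hjv⟩
      have hsplit : j ∈ st.takeWhile (fun j => decide (nums.getD k 0 < nums.getD j 0)) ++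
          st.dropWhile (fun j => decide (nums.getD k 0 < nums.getD j 0)) := by
        rw [List.takeWhile_append_dropWhile]; exact hjs
      rcases List.mem_append.mp hsplit with hx | hx
      · exact hx
      · exact absurd ((hdw j).mp hx).2 (not_le.mpr hjv)
  show InvA nums (k + 1)
    (k :: (popA nums k st ris).1, (popA nums k st ris).2, topA lis k (popA nums k st ris).1)
  rw [hpop1]
  refine ⟨?_, ?_, ?_, ?_, ?_, ?_, ?_, ?_⟩
  · -- pairwise
    exact List.pairwise_cons.mpr
      ⟨fun j hj => hltk j ((hdw j).mp hj).1, hpw.sublist (List.dropWhile_sublist _)⟩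
  · simpa [hpop2] using hrl
  · -- lis length
    cases hdd : st.dropWhile (fun j => decide (nums.getD k 0 < nums.getD j 0)) with
    | nil => exact hll
    | cons j0 t => simpa [topA] using hll
  · -- membership characterisation
    intro j
    constructor
    · intro hj
      rcases List.mem_cons.mp hj with rfl | hjd
      · exact ⟨by omega, fun m hm hm2 => absurd hm (by omega)⟩
      · obtain ⟨hjs, hjv⟩ := (hdw j).mp hjd
        obtain ⟨hjk, hcond⟩ := (hmem j).mp hjs
        refine ⟨by omega, fun m hm hm2 => ?_⟩
        rcases Nat.lt_succ_iff_lt_or_eq.mp hm2 with hx | rfl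
        · exact hcond m hm hx
        · exact hjv
    · rintro ⟨hjk1, hcond⟩
      by_cases hjk : j = k
      · subst hjk; exact List.mem_cons_self ..
      · have hjk' : j < k := by omega
        have hjs : j ∈ st := (hmem j).mpr ⟨hjk', fun m hm hm2 => hcond m hm (by omega)⟩
        exact List.mem_cons_of_mem _ ((hdw j).mpr ⟨hjs, hcond k hjk' (by omega)⟩)
  · -- untouched ris entries are n
    intro j hjn hj
    rw [hpop3 j]
    have hjtw : j ∉ st.takeWhile (fun j => decide (nums.getD k 0 < nums.getD j 0)) := by
      intro hx
      obtain ⟨hxs, hxv⟩ := (htw j).mp hx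
      rcases hj with hj | hj
      · rcases List.mem_cons.mp hj with rfl | hjd
        · exact hknotin hxs
        · exact absurd ((hdw j).mp hjd).2 (not_le.mpr hxv)
      · exact absurd (hltk j hxs) (by omega)
    rw [if_neg hjtw]
    apply hrisn j hjn
    rcases hj with hj | hj
    · rcases List.mem_cons.mp hj with rfl | hjd
      · exact Or.inr le_rfl
      · exact Or.inl ((hdw j).mp hjd).1
    · exact Or.inr (by omega)
  · -- popped entries carry their next-smaller index
    intro j hjk1 hj
    have hjne : j ≠ k := fun hx => hj (hx ▸ List.mem_cons_self ..)
    have hjk : j < k := by omega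
    have hjnd : j ∉ st.dropWhile (fun j => decide (nums.getD k 0 < nums.getD j 0)) :=
      fun hx => hj (List.mem_cons_of_mem _ hx)
    by_cases hjs : j ∈ st
    · have hjtw : j ∈ st.takeWhile (fun j => decide (nums.getD k 0 < nums.getD j 0)) := by
        have hsplit : j ∈ st.takeWhile (fun j => decide (nums.getD k 0 < nums.getD j 0)) ++
            st.dropWhile (fun j => decide (nums.getD k 0 < nums.getD j 0)) := by
          rw [List.takeWhile_append_dropWhile]; exact hjs
        rcases List.mem_append.mp hsplit with hx | hx
        · exact hx
        · exact absurd hx hjnd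
      have hjv : nums.getD k 0 < nums.getD j 0 := ((htw j).mp hjtw).2
      refine ⟨k, hjk, by omega, hjv, fun m' hm hm2 => ((hmem j).mp hjs).2 m' hm hm2, ?_⟩
      rw [hpop3 j, if_pos hjtw]
    · obtain ⟨m, h1, h2, h3, h4, h5⟩ := hrism j hjk hjs
      have hjtw : j ∉ st.takeWhile (fun j => decide (nums.getD k 0 < nums.getD j 0)) :=
        fun hx => hjs ((htw j).mp hx).1
      exact ⟨m, h1, by omega, h3, h4, by rw [hpop3 j, if_neg hjtw]; exact h5⟩
  · -- lis entries are the left scans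
    intro i hik1
    by_cases hik : i = k
    · subst hik
      cases hdd : st.dropWhile (fun j => decide (nums.getD i 0 < nums.getD j 0)) with
      | nil =>
        have hall : ∀ m, m < i → nums.getD i 0 < nums.getD m 0 := by
          by_contra hc
          push Not at hc
          obtain ⟨m, hmk, hpm⟩ := hc
          obtain ⟨m0, hm0k, hp0, hmax⟩ :=
            exists_greatest_lt (fun m => nums.getD m 0 ≤ nums.getD i 0) i ⟨m, hmk, hpm⟩
          have hm0s : m0 ∈ st := (hmem m0).mpr ⟨hm0k, fun m' hm' hm'2 =>
            le_trans hp0 (le_of_lt (not_le.mp (fun hle => hmax m' hm' hm'2 hle)))⟩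
          have hm0d : m0 ∈ st.dropWhile (fun j => decide (nums.getD i 0 < nums.getD j 0)) :=
            (hdw m0).mpr ⟨hm0s, hp0⟩
          rw [hdd] at hm0d
          simp at hm0d
        rw [topA, hlis0 i le_rfl hk]
        exact (scanL_none nums _ i hall).symm
      | cons j0 t =>
        have hj0d : j0 ∈ st.dropWhile (fun j => decide (nums.getD i 0 < nums.getD j 0)) :=
          hdd ▸ List.mem_cons_self ..
        obtain ⟨hj0s, hj0v⟩ := (hdw j0).mp hj0d
        have hj0k : j0 < i := hltk j0 hj0s
        rw [topA, getD_set', if_pos ⟨rfl, by rw [hll]; exact hk⟩]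
        refine (scanL_stop nums _ i j0 hj0k hj0v ?_).symm
        intro m hm hm2
        by_contra hc
        push Not at hc
        obtain ⟨m1, hm1k, hp1, hmax⟩ :=
          exists_greatest_lt (fun m => nums.getD m 0 ≤ nums.getD i 0) i ⟨m, hm2, hc⟩
        have hm1s : m1 ∈ st := (hmem m1).mpr ⟨hm1k, fun m' hm' hm'2 =>
          le_trans hp1 (le_of_lt (not_le.mp (fun hle => hmax m' hm' hm'2 hle)))⟩
        have hm1d : m1 ∈ st.dropWhile (fun j => decide (nums.getD i 0 < nums.getD j 0)) :=
          (hdw m1).mpr ⟨hm1s, hp1⟩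
        have hmm1 : m ≤ m1 := by
          by_contra hx
          exact hmax m (by omega) hm2 hc
        rw [hdd] at hm1d
        rcases List.mem_cons.mp hm1d with rfl | hm1t
        · omega
        · have hpw' : (j0 :: t).Pairwise (fun a b => a > b) := by
            rw [← hdd]; exact hpw.sublist (List.dropWhile_sublist _)
          have := (List.pairwise_cons.mp hpw').1 m1 hm1t
          omega
    · have hik' : i < k := by omega
      cases hdd : st.dropWhile (fun j => decide (nums.getD k 0 < nums.getD j 0)) with
      | nil => exact hlis i hik'
      | cons j0 t =>
        rw [topA, getD_set', if_neg (by tauto)]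
        exact hlis i hik'
  · -- lis entries beyond k+1 are still -1
    intro i hik1 hin
    cases hdd : st.dropWhile (fun j => decide (nums.getD k 0 < nums.getD j 0)) with
    | nil => exact hlis0 i (by omega) hin
    | cons j0 t =>
      rw [topA, getD_set', if_neg (by omega)]
      exact hlis0 i (by omega) hin

theorem loopA_inv (nums : List Int) : ∀ k, k ≤ nums.length →
    InvA nums k ((List.range k).foldl (stepA nums)
      ([], List.replicate nums.length ((nums.length : Nat) : Int),
        List.replicate nums.length (-1 : Int))) := by
  intro k
  induction k with
  | zero => intro _; exact invA_init nums
  | succ k ih =>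
    intro hk
    rw [List.range_succ, List.foldl_append, List.foldl_cons, List.foldl_nil]
    exact invA_step nums k (by omega) _ (ih (by omega))

theorem final_tables (nums : List Int) (i : Nat) (hi : i < nums.length) :
    ((List.range nums.length).foldl (stepA nums)
      ([], List.replicate nums.length ((nums.length : Nat) : Int),
        List.replicate nums.length (-1 : Int))).2.1.getD i 0 =
      ((scanR nums (nums.getD i 0) (nums.length - (i + 1)) (i + 1) : Nat) : Int) ∧
    ((List.range nums.length).foldl (stepA nums)
      ([], List.replicate nums.length ((nums.length : Nat) : Int),
        List.replicate nums.length (-1 : Int))).2.2.getD i 0 =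
      scanL nums (nums.getD i 0) i := by
  obtain ⟨hpw, hrl, hll, hmem, hrisn, hrism, hlis, hlis0⟩ := loopA_inv nums nums.length le_rfl
  refine ⟨?_, hlis i hi⟩
  by_cases hs : i ∈ ((List.range nums.length).foldl (stepA nums)
      ([], List.replicate nums.length ((nums.length : Nat) : Int),
        List.replicate nums.length (-1 : Int))).1
  · rw [hrisn i hi (Or.inl hs)]
    obtain ⟨_, hcond⟩ := (hmem i).mp hs
    rw [scanR_all nums _ _ _ (fun m hm hm2 => hcond m (by omega) (by omega))]
    congr 1
    omega
  · obtain ⟨m, h1, h2, h3, h4, h5⟩ := hrism i hi hs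
    rw [h5, scanR_stop nums _ _ _ m (by omega) (by omega) h3
      (fun m' hm' hm'2 => h4 m' (by omega) (by omega))]

theorem main_eq (nums : List Int) : findMaximums nums = findMaximums_alt nums := by
  unfold findMaximums findMaximums_alt
  simp only []
  congr 1
  apply PySem.List.foldl_congr_mem
  intro acc i hi
  have hi' : i < nums.length := List.mem_range.mp hi
  obtain ⟨h1, h2⟩ := final_tables nums i hi'
  rw [h1, h2]

-- ===== VERDICT (by name: the statement is the Claim_ definition above) =====
theorem findMaximums_spec : Claim_equal_findMaximums := by
  intro nums _
  exact main_eq nums
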